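-- pv_equiv track=rewrite | github.com/svijasvg/cloud | svija/views/modules/rewrite_svg.py | clean_tspans
-- ===== SOURCE A (Python) =====
-- def get_xy_content(str):
--   values = str.split("\"",4)
--   x      = values[1]
--   y      = values[3]
--   rest   = values[4]
--
--   rest_parts_1 = rest.split(">",1)  # split at first >
--   half_two = rest_parts_1[1]        # keep second part
--   rest_parts_2 = half_two.split("</tspan")  # split at end of tspan
--   content = rest_parts_2[0]
--
--   return x, y, rest, content
--
-- def clean_tspans(line):
--
--   tspans = line.split('<tspan ')
--   first_bit = tspans.pop(0)
--
--   tspans = ['<tspan {0}'.format(i) for i in tspans] # add tspans back to list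
--
--   number_of_tspans = len(tspans)
--   output = ''
--
--   # go through tspans from last to 2nd (start, end, step)
--   # https://stackoverflow.com/questions/4504662/why-does-rangestart-end-not-include-end
--   # reverse range ends earlier than expected
--
--   for x in range (number_of_tspans-1, -1, -1):
--
--     this_x, this_y, this_rest, this_content = get_xy_content(tspans[x])
--
--     if this_content == "\t": continue # AI gives tabs an empty tspan
--
--     if x > 0 and this_x != 0:
--       prev_x, prev_y, prev_rest, prev_content  = get_xy_content(tspans[x-1])
--
--       # if the Y height is same as previous block, and there's no text separation
--       # we get rid of the x & y coordinates
--       if this_y == prev_y and prev_content != "\t":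
--         tspans[x] = '<tspan ' + this_rest # strip coordinates from tspans[x]
--
--     # add a CR for debugging only — it causes Firefbx & Chrome to add whitespace
--     output = tspans[x] + "" + output
--
--   output = first_bit + "\n" + output
--   return output
-- ===== SOURCE B (Python) =====
-- def _parse(t):
--   values = t.split("\"", 4)
--   y = values[3]
--   rest = values[4]
--   content = rest.split(">", 1)[1].split("</tspan")[0]
--   return t, y, rest, content
--
-- def clean_tspans(line):
--   parts = line.split('<tspan ')
--   first_bit = parts[0]
--   recs = [_parse('<tspan ' + p) for p in parts[1:]]
--   out_parts = []
--   for i, (t, y, rest, content) in enumerate(recs):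
--     if content == "\t":
--       continue
--     if i > 0 and recs[i - 1][1] == y and recs[i - 1][3] != "\t":
--       out_parts.append('<tspan ' + rest)
--     else:
--       out_parts.append(t)
--   return first_bit + "\n" + ''.join(out_parts)
-- ===== Notes on version B (the rewrite author's own statement) =====
-- stated objective: faster
-- what changed: B parses each tspan exactly once into a forward list of (tspan, y, rest, content) records and builds the output in one forward pass with ''.join, instead of A's backward index loop that re-parses the predecessor tspan at every step, mutates the list in place and builds the result by repeated string prepending.
import Mathlib
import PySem

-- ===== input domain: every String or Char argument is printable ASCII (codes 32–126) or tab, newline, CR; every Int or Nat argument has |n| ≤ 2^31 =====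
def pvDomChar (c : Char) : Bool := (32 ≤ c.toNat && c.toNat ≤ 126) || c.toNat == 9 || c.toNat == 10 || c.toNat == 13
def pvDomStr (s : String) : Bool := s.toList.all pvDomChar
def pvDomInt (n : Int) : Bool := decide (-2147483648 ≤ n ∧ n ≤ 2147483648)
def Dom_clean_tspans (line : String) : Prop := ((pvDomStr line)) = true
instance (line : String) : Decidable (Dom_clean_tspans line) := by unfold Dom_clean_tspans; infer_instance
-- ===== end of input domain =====

-- B replaces A's backward re-parsing loop (each tspan parsed up to twice, output built by
-- repeated string prepending) with one parse pass into records plus one forward pass joined at the end.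

-- ===== PORT A =====
-- helper get_xy_content: values[1]/values[3]/values[4] and rest_parts_1[1] raise IndexError in
-- Python when missing; pyGetD defaults are reached only outside Pre_clean_tspans.
def get_xy_content (s : List Char) : List Char × List Char × List Char × List Char :=
  let values := PySem.Chars.splitOnMax s ['"'] 4
  let x := PySem.List.pyGetD values 1 []
  let y := PySem.List.pyGetD values 3 []
  let rest := PySem.List.pyGetD values 4 []
  let rest_parts_1 := PySem.Chars.splitOnMax rest ['>'] 1
  let half_two := PySem.List.pyGetD rest_parts_1 1 []
  let rest_parts_2 := PySem.Chars.splitOn half_two "</tspan".toList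
  let content := PySem.List.pyGetD rest_parts_2 0 []
  (x, y, rest, content)

-- the body of A's backward for-loop, state = (tspans, output)
def pvStepA (st : List (List Char) × List Char) (x : Int) : List (List Char) × List Char :=
  let ts := st.1
  let output := st.2
  let r := get_xy_content (PySem.List.pyGetD ts x [])
  let this_y := r.2.1
  let this_rest := r.2.2.1
  let this_content := r.2.2.2
  if this_content = ['\t'] then (ts, output)  -- continue
  else
    -- Python's 'x > 0 and this_x != 0': the second conjunct compares a str with the int 0,
    -- hence is always True; only 'x > 0' remains.
    let ts :=
      if x > 0 then
        let p := get_xy_content (PySem.List.pyGetD ts (x - 1) [])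
        if this_y = p.2.1 ∧ p.2.2.2 ≠ ['\t'] then
          PySem.List.pySetD ts x ("<tspan ".toList ++ this_rest)
        else ts
      else ts
    (ts, PySem.List.pyGetD ts x [] ++ output)

def clean_tspans (line : String) : String :=
  let tspans0 := PySem.Chars.splitOn line.toList "<tspan ".toList
  let first_bit := tspans0.headD []  -- tspans.pop(0): split never returns an empty list
  let tspans := tspans0.tail.map (fun i => "<tspan ".toList ++ i)
  let number_of_tspans := tspans.length
  let st := (PySem.List.pyRange ((number_of_tspans : Int) - 1) (-1) (-1)).foldl pvStepA (tspans, [])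
  String.ofList (first_bit ++ '\n' :: st.2)

-- ===== PORT B =====
-- B's _parse: one parse per tspan, record (t, y, rest, content)
def pv_parse (t : List Char) : List Char × List Char × List Char × List Char :=
  let values := PySem.Chars.splitOnMax t ['"'] 4
  let y := PySem.List.pyGetD values 3 []
  let rest := PySem.List.pyGetD values 4 []
  let content := PySem.List.pyGetD
    (PySem.Chars.splitOn (PySem.List.pyGetD (PySem.Chars.splitOnMax rest ['>'] 1) 1 []) "</tspan".toList) 0 []
  (t, y, rest, content)

-- the body of B's forward for-loop over enumerate(recs)
def pvStepB (recs : List (List Char × List Char × List Char × List Char))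
    (acc : List (List Char)) (ir : Int × (List Char × List Char × List Char × List Char)) :
    List (List Char) :=
  let i := ir.1
  let t := ir.2.1
  let y := ir.2.2.1
  let rest := ir.2.2.2.1
  let content := ir.2.2.2.2
  if content = ['\t'] then acc
  else if i > 0 ∧ (PySem.List.pyGetD recs (i - 1) ([], [], [], [])).2.1 = y ∧
      (PySem.List.pyGetD recs (i - 1) ([], [], [], [])).2.2.2 ≠ ['\t'] then
    acc ++ ["<tspan ".toList ++ rest]
  else acc ++ [t]

def clean_tspans_alt (line : String) : String :=
  let parts := PySem.Chars.splitOn line.toList "<tspan ".toList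
  let first_bit := parts.headD []
  let recs := parts.tail.map (fun p => pv_parse ("<tspan ".toList ++ p))
  let out_parts := (PySem.List.enumerate recs 0).foldl (pvStepB recs) []
  String.ofList (first_bit ++ '\n' :: PySem.Chars.join [] out_parts)

-- ===== PRECONDITION & SPEC =====
-- Pre_ excludes exactly the inputs on which Python A raises IndexError in get_xy_content:
-- a tspan piece with fewer than four '"' (no x/y coordinate pair) or with no '>' after them.
def pvTspanOK (s : List Char) : Bool :=
  let values := PySem.Chars.splitOnMax s ['"'] 4
  values.length == 5 && (PySem.Chars.splitOnMax (values.getD 4 []) ['>'] 1).length == 2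

def Pre_clean_tspans (line : String) : Prop :=
  ∀ t ∈ (PySem.Chars.splitOn line.toList "<tspan ".toList).tail,
    pvTspanOK ("<tspan ".toList ++ t) = true
instance (line : String) : Decidable (Pre_clean_tspans line) := by
  unfold Pre_clean_tspans; infer_instance

def pvWitness_clean_tspans : String := "a<tspan x=\"1\" y=\"2\" f>hi</tspan>"

def Spec_clean_tspans (line : String) (out : String) : Prop := out = clean_tspans_alt line
instance (line : String) (out : String) : Decidable (Spec_clean_tspans line out) := by
  unfold Spec_clean_tspans; infer_instance

-- ===== CLAIM (what is proved, stated in full; the proofs are below) =====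
def Claim_equal_clean_tspans : Prop := ∀ (line : String), Dom_clean_tspans line → Pre_clean_tspans line → Spec_clean_tspans line (clean_tspans line)

-- ===== LEMMAS AND PROOFS =====

-- the value contributed to the output by tspan k of the (prefixed) tspan list ts
def pvChunk (ts : List (List Char)) (k : Nat) : List Char :=
  let t := ts.getD k []
  let r := get_xy_content t
  if r.2.2.2 = ['\t'] then []
  else if 0 < k ∧ r.2.1 = (get_xy_content (ts.getD (k - 1) [])).2.1 ∧
      (get_xy_content (ts.getD (k - 1) [])).2.2.2 ≠ ['\t'] then
    "<tspan ".toList ++ r.2.2.1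
  else t

theorem pv_parse_eq (t : List Char) : pv_parse t = (t, (get_xy_content t).2) := rfl

theorem joinNil (l : List (List Char)) : PySem.Chars.join [] l = l.flatten := by
  show List.intercalate [] l = _
  induction l with
  | nil => rfl
  | cons x xs ih =>
    cases xs with
    | nil => simp [List.intercalate, List.intersperse]
    | cons y t =>
      simp only [List.intercalate, List.intersperse] at ih ⊢
      simp only [List.flatten_cons] at ih ⊢
      rw [← ih]
      simp

theorem getD_getElem? {ts TS : List (List Char)} {i k : Nat}
    (hinv : ∀ j : Nat, j < k → ts[j]? = TS[j]?) (hi : i < k) :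
    ts.getD i [] = TS.getD i [] := by
  rw [List.getD_eq_getElem?_getD, hinv i hi, ← List.getD_eq_getElem?_getD]

-- A's backward loop computes the concatenation of pvChunk over the original list
theorem pvA_loop (TS : List (List Char)) (k : Nat) (hk : k ≤ TS.length) :
    ∀ (ts : List (List Char)) (out : List Char), ts.length = TS.length →
    (∀ i : Nat, i < k → ts[i]? = TS[i]?) →
    ((PySem.List.pyRange ((k : Int) - 1) (-1) (-1)).foldl pvStepA (ts, out)).2
      = ((List.range k).map (pvChunk TS)).flatten ++ out := by
  induction k with
  | zero =>
    intro ts out _ _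
    rw [PySem.List.pyRange_neg_one_eq_nil (by omega)]
    simp
  | succ k ih =>
    intro ts out hlen hinv
    have hkTS : k < TS.length := by omega
    have hcast : ((k + 1 : Nat) : Int) - 1 = (k : Int) := by push_cast; ring
    rw [hcast, PySem.List.pyRange_neg_one_cons (by omega : (-1 : Int) < (k : Int)),
      List.foldl_cons, List.range_succ, List.map_append, List.flatten_append]
    have e1 : ts.getD k [] = TS.getD k [] := getD_getElem? hinv (by omega)
    by_cases htab : (get_xy_content (TS.getD k [])).2.2.2 = ['\t']
    · have hstep : pvStepA (ts, out) ((k : Nat) : Int) = (ts, out) := by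
        simp only [pvStepA, PySem.List.pyGetD_natCast, e1]
        rw [if_pos htab]
      have hchunk : pvChunk TS k = [] := by
        simp only [pvChunk]
        rw [if_pos htab]
      rw [hstep, ih (by omega) ts out hlen (fun i hi => hinv i (by omega))]
      simp [hchunk]
    · by_cases hk0 : 0 < k
      · have hcast2 : ((k : Nat) : Int) - 1 = ((k - 1 : Nat) : Int) := by
          have : (1 : Nat) ≤ k := hk0
          push_cast [this]; ring
        have e2 : ts.getD (k - 1) [] = TS.getD (k - 1) [] := getD_getElem? hinv (by omega)
        by_cases hm : (get_xy_content (TS.getD k [])).2.1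
              = (get_xy_content (TS.getD (k - 1) [])).2.1
            ∧ (get_xy_content (TS.getD (k - 1) [])).2.2.2 ≠ ['\t']
        · -- coordinates are stripped
          have hstep : pvStepA (ts, out) ((k : Nat) : Int) =
              (ts.set k ("<tspan ".toList ++ (get_xy_content (TS.getD k [])).2.2.1),
               ("<tspan ".toList ++ (get_xy_content (TS.getD k [])).2.2.1) ++ out) := by
            simp only [pvStepA, PySem.List.pyGetD_natCast, e1]
            rw [if_neg htab, if_pos (by exact_mod_cast hk0), hcast2,
              PySem.List.pyGetD_natCast, e2, if_pos hm, PySem.List.pySetD_natCast]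
            simp [List.getD_eq_getElem?_getD, List.getElem?_set_self (show k < ts.length by omega)]
          have hchunk : pvChunk TS k = "<tspan ".toList ++ (get_xy_content (TS.getD k [])).2.2.1 := by
            simp only [pvChunk]
            rw [if_neg htab, if_pos ⟨hk0, hm.1, hm.2⟩]
          rw [hstep, ih (by omega) _ _ (by simp [hlen])
            (fun i hi => by rw [List.getElem?_set_ne (by omega : k ≠ i)]; exact hinv i (by omega))]
          simp [hchunk]
        · -- kept as is
          have hstep : pvStepA (ts, out) ((k : Nat) : Int) =
              (ts, TS.getD k [] ++ out) := by
            simp only [pvStepA, PySem.List.pyGetD_natCast, e1]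
            rw [if_neg htab, if_pos (by exact_mod_cast hk0), hcast2,
              PySem.List.pyGetD_natCast, e2, if_neg hm, e1]
          have hchunk : pvChunk TS k = TS.getD k [] := by
            simp only [pvChunk]
            rw [if_neg htab, if_neg (by intro h; exact hm ⟨h.2.1, h.2.2⟩)]
          rw [hstep, ih (by omega) ts _ hlen (fun i hi => hinv i (by omega))]
          simp [hchunk]
      · -- k = 0
        have hkz : k = 0 := by omega
        subst hkz
        have hstep : pvStepA (ts, out) ((0 : Nat) : Int) = (ts, TS.getD 0 [] ++ out) := by
          simp only [pvStepA, PySem.List.pyGetD_natCast, e1]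
          rw [if_neg htab, if_neg (by norm_num), e1]
        have hchunk : pvChunk TS 0 = TS.getD 0 [] := by
          simp only [pvChunk]
          rw [if_neg htab, if_neg (by intro h; exact absurd h.1 (by omega))]
        rw [hstep, ih (by omega) ts _ hlen (fun i hi => hinv i (by omega))]
        simp [hchunk]

theorem getD_map_parse (TS : List (List Char)) (i : Nat) (h : i < TS.length)
    (d : List Char × List Char × List Char × List Char) :
    (TS.map pv_parse).getD i d = pv_parse (TS.getD i []) := by
  simp [List.getD_eq_getElem?_getD, h]

-- B's forward loop computes the same concatenation
theorem pvB_loop (TS : List (List Char)) :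
    ∀ (n j : Nat) (acc : List (List Char)), TS.length - j = n → j ≤ TS.length →
    (((PySem.List.enumerate ((TS.drop j).map pv_parse) ((j : Nat) : Int)).foldl
        (pvStepB (TS.map pv_parse)) acc)).flatten
      = acc.flatten ++ ((List.range (TS.length - j)).map (fun m => pvChunk TS (j + m))).flatten := by
  intro n
  induction n with
  | zero =>
    intro j acc hn hj
    rw [List.drop_eq_nil_of_le (by omega), hn]
    simp
  | succ n ih =>
    intro j acc hn hj
    have hjTS : j < TS.length := by omega
    rw [List.drop_eq_getElem_cons hjTS, List.map_cons, PySem.List.enumerate_cons,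
      List.foldl_cons, hn, List.range_succ_eq_map, List.map_cons, List.flatten_cons]
    have hmapshift : (List.map Nat.succ (List.range n)).map (fun m => pvChunk TS (j + m))
        = (List.range n).map (fun m => pvChunk TS ((j + 1) + m)) := by
      rw [List.map_map]
      exact List.map_congr_left (fun m _ => by
        simp only [Function.comp, Nat.succ_eq_add_one]
        rw [show j + (m + 1) = (j + 1) + m by omega])
    have hTSj : TS[j] = TS.getD j [] := by
      rw [List.getD_eq_getElem?_getD, List.getElem?_eq_getElem hjTS]; rfl
    have hcons : PySem.List.enumerate ((TS.drop (j + 1)).map pv_parse) (((j : Nat) : Int) + 1)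
        = PySem.List.enumerate ((TS.drop (j + 1)).map pv_parse) (((j + 1 : Nat) : Int)) := by
      norm_num
    by_cases htab : (get_xy_content (TS.getD j [])).2.2.2 = ['\t']
    · have hstep : pvStepB (TS.map pv_parse) acc (((j : Nat) : Int), pv_parse TS[j]) = acc := by
        simp only [pvStepB, pv_parse_eq, hTSj]
        rw [if_pos htab]
      have hchunk : pvChunk TS (j + 0) = [] := by
        simp only [pvChunk, Nat.add_zero]
        rw [if_pos htab]
      rw [hstep, hchunk, hcons, ih (j + 1) acc (by omega) (by omega), hmapshift]
      simp [show TS.length - (j + 1) = n by omega]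
    · have hchunkval : pvChunk TS (j + 0) =
          (if 0 < j ∧ (get_xy_content (TS.getD j [])).2.1
                = (get_xy_content (TS.getD (j - 1) [])).2.1
              ∧ (get_xy_content (TS.getD (j - 1) [])).2.2.2 ≠ ['\t'] then
            "<tspan ".toList ++ (get_xy_content (TS.getD j [])).2.2.1
          else TS.getD j []) := by
        simp only [pvChunk, Nat.add_zero]
        rw [if_neg htab]
      by_cases hcond : 0 < j ∧ (get_xy_content (TS.getD j [])).2.1
            = (get_xy_content (TS.getD (j - 1) [])).2.1
          ∧ (get_xy_content (TS.getD (j - 1) [])).2.2.2 ≠ ['\t']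
      · have hj1 : j - 1 < TS.length := by omega
        have hcast2 : ((j : Nat) : Int) - 1 = ((j - 1 : Nat) : Int) := by
          have : (1 : Nat) ≤ j := hcond.1
          push_cast [this]; ring
        have hstep : pvStepB (TS.map pv_parse) acc (((j : Nat) : Int), pv_parse TS[j])
            = acc ++ ["<tspan ".toList ++ (get_xy_content (TS.getD j [])).2.2.1] := by
          simp only [pvStepB, pv_parse_eq, hTSj]
          rw [if_neg htab, hcast2, PySem.List.pyGetD_natCast, getD_map_parse TS (j - 1) hj1,
            pv_parse_eq]
          rw [if_pos ⟨by exact_mod_cast hcond.1, hcond.2.1.symm, hcond.2.2⟩]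
        rw [hstep, hcons, ih (j + 1) _ (by omega) (by omega), hmapshift, hchunkval, if_pos hcond]
        simp [show TS.length - (j + 1) = n by omega]
      · have hstep : pvStepB (TS.map pv_parse) acc (((j : Nat) : Int), pv_parse TS[j])
            = acc ++ [TS.getD j []] := by
          simp only [pvStepB, pv_parse_eq, hTSj]
          rw [if_neg htab]
          by_cases hj0 : 0 < j
          · have hj1 : j - 1 < TS.length := by omega
            have hcast2 : ((j : Nat) : Int) - 1 = ((j - 1 : Nat) : Int) := by
              have : (1 : Nat) ≤ j := hj0
              push_cast [this]; ring
            rw [hcast2, PySem.List.pyGetD_natCast, getD_map_parse TS (j - 1) hj1, pv_parse_eq]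
            rw [if_neg (by
              intro h
              exact hcond ⟨hj0, h.2.1.symm, h.2.2⟩)]
          · have hjz : j = 0 := by omega
            subst hjz
            rw [if_neg (by intro h; exact absurd h.1 (by norm_num))]
        rw [hstep, hcons, ih (j + 1) _ (by omega) (by omega), hmapshift, hchunkval, if_neg hcond]
        simp [show TS.length - (j + 1) = n by omega]

-- ===== VERDICT (by name: the statement is the Claim_ definition above) =====
theorem clean_tspans_spec : Claim_equal_clean_tspans := by
  intro line _ _
  unfold Spec_clean_tspans clean_tspans clean_tspans_alt
  simp only []
  set parts := PySem.Chars.splitOn line.toList "<tspan ".toList with hparts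
  set TS := parts.tail.map (fun i => "<tspan ".toList ++ i) with hTS
  have hrecs : parts.tail.map (fun p => pv_parse ("<tspan ".toList ++ p)) = TS.map pv_parse := by
    rw [hTS, List.map_map]
    rfl
  have hA := pvA_loop TS TS.length le_rfl TS [] rfl (fun i _ => rfl)
  have hB := pvB_loop TS TS.length 0 [] (by omega) (by omega)
  simp only [List.drop_zero, Nat.cast_zero, Nat.sub_zero, zero_add, List.flatten_nil,
    List.nil_append] at hB
  rw [hA, hrecs, joinNil, hB]
  simp
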